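-- pv_equiv track=rewrite | github.com/rizvisha/Python | poetry_functions.py | last_phonemes
-- ===== SOURCE A (Python) =====
-- def last_phonemes(phoneme_list):
--     """ (list of str) -> list of str
--
--     Return the last vowel phoneme and subsequent consonant phoneme(s) in
--     phoneme_list.
--
--     >>> last_phonemes(['AE1', 'B', 'S', 'IH0', 'N', 'TH'])
--     ['IH0', 'N', 'TH']
--     >>> last_phonemes(['IH0', 'N'])
--     ['IH0', 'N']
--     >>> last_phonemes(['B', 'S'])
--     []
--     """
--     vowel_phonemes = []
--     i = len(phoneme_list) - 1
--     c = len(phoneme_list) - 1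
--     while i >= 0:
--         if phoneme_list[i].endswith('0') or phoneme_list[i].endswith('1') \
--            or phoneme_list[i].endswith('2'):
--             while i <= c:
--                 vowel_phonemes.append(phoneme_list[i])
--                 i +=1
--             return vowel_phonemes
--         i -= 1
--     return vowel_phonemes
-- ===== SOURCE B (Python) =====
-- def last_phonemes(phoneme_list):
--     """One forward pass recording the index of the last vowel phoneme,
--     then emit the tail of the list as a single slice."""
--     last = -1
--     for i, ph in enumerate(phoneme_list):
--         if ph.endswith(('0', '1', '2')):
--             last = i
--     if last < 0:
--         return []
--     return phoneme_list[last:]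
-- ===== Notes on version B (the rewrite author's own statement) =====
-- stated objective: simpler
-- what changed: Replaces the backward while-loop search plus an inner element-by-element append loop with a single forward enumerate pass that records the last vowel index, followed by one slice.
import Mathlib
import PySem

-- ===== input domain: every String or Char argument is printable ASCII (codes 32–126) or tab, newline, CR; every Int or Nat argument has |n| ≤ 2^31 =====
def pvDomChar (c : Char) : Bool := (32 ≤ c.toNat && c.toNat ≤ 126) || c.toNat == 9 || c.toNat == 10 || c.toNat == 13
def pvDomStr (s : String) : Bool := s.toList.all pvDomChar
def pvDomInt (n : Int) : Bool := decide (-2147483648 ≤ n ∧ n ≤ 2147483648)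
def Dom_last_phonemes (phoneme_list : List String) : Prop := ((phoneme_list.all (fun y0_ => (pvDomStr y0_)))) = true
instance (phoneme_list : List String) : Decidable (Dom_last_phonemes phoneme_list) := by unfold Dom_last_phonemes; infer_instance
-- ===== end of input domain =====

-- B replaces A's backward scan with inner copy loop by one forward pass recording the
-- last vowel index, then a single slice (objective: simpler).

-- ===== PORT A =====
-- endswith('0') or endswith('1') or endswith('2')
def pvVowelA (s : String) : Bool :=
  PySem.Str.endswith s "0" || PySem.Str.endswith s "1" || PySem.Str.endswith s "2"

-- inner 'while i <= c: vowel_phonemes.append(phoneme_list[i]); i += 1' (c = len-1)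
def lpA_inner (xs : List String) (i : Nat) : List String :=
  if h : i < xs.length then xs[i] :: lpA_inner xs (i + 1) else []
  termination_by xs.length - i

-- outer 'while i >= 0: … i -= 1', argument is i + 1 (0 = loop exhausted)
def lpA_loop (xs : List String) : Nat → List String
  | 0 => []
  | i + 1 => if pvVowelA (xs.getD i "") then lpA_inner xs i else lpA_loop xs i

def last_phonemes (phoneme_list : List String) : List String :=
  lpA_loop phoneme_list phoneme_list.length

-- ===== PORT B =====
-- ph.endswith(('0', '1', '2')) is the same predicate as A's three endswith tests (pvVowelA, shared)
def last_phonemes_alt (phoneme_list : List String) : List String :=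
  let last := (PySem.List.enumerate phoneme_list).foldl
      (fun acc p => if pvVowelA p.2 then p.1 else acc) (-1 : Int)
  if last < 0 then [] else PySem.List.slice phoneme_list (some last) none

-- ===== PRECONDITION & SPEC =====
def Spec_last_phonemes (phoneme_list : List String) (out : List String) : Prop := out = last_phonemes_alt phoneme_list
instance (phoneme_list : List String) (out : List String) : Decidable (Spec_last_phonemes phoneme_list out) := by unfold Spec_last_phonemes; infer_instance

-- ===== CLAIM (what is proved, stated in full; the proofs are below) =====
def Claim_equal_last_phonemes : Prop := ∀ (phoneme_list : List String), Dom_last_phonemes phoneme_list → Spec_last_phonemes phoneme_list (last_phonemes phoneme_list)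

-- ===== LEMMAS AND PROOFS =====

-- last vowel index among positions < i (scan downward), -1 if none
def pvLB (xs : List String) : Nat → Int
  | 0 => -1
  | i + 1 => if pvVowelA (xs.getD i "") then (i : Int) else pvLB xs i

theorem lpA_inner_eq_drop (xs : List String) (i : Nat) : lpA_inner xs i = xs.drop i := by
  fun_induction lpA_inner xs i with
  | case1 i h ih =>
      rw [ih, List.drop_eq_getElem_cons h]
  | case2 i h =>
      simp [List.drop_eq_nil_of_le (Nat.le_of_not_lt h)]

theorem lpA_loop_eq (xs : List String) (i : Nat) :
    lpA_loop xs i = if pvLB xs i < 0 then [] else xs.drop (pvLB xs i).toNat := by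
  induction i with
  | zero => simp [lpA_loop, pvLB]
  | succ i ih =>
      simp only [lpA_loop, pvLB, List.getD]
      by_cases hv : pvVowelA (xs[i]?.getD "") = true
      · simp [hv, lpA_inner_eq_drop]
      · simp [hv, ih]

theorem pvLB_append (xs : List String) (x : String) (i : Nat) (hi : i ≤ xs.length) :
    pvLB (xs ++ [x]) i = pvLB xs i := by
  induction i with
  | zero => rfl
  | succ i ih =>
      simp only [pvLB, ih (by omega)]
      rw [List.getD_append _ _ _ _ (by omega)]

theorem fold_eq_pvLB (xs : List String) :
    (PySem.List.enumerate xs).foldl (fun acc p => if pvVowelA p.2 then p.1 else acc) (-1 : Int)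
      = pvLB xs xs.length := by
  induction xs using List.reverseRecOn with
  | nil => rfl
  | append_singleton xs x ih =>
      rw [PySem.List.enumerate_append, List.foldl_append, ih]
      simp only [PySem.List.enumerate_cons, PySem.List.enumerate_nil, List.foldl_cons,
        List.foldl_nil, List.length_append, List.length_cons, List.length_nil]
      have h1 : pvLB (xs ++ [x]) (xs.length + 1)
          = if pvVowelA ((xs ++ [x]).getD xs.length "") then (xs.length : Int)
            else pvLB (xs ++ [x]) xs.length := rfl
      rw [h1, pvLB_append xs x xs.length (le_refl _)]
      have h2 : (xs ++ [x]).getD xs.length "" = x := by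
        simp [List.getD]
      rw [h2]
      by_cases hv : pvVowelA x = true <;> simp [hv]

-- ===== VERDICT (by name: the statement is the Claim_ definition above) =====
theorem last_phonemes_spec : Claim_equal_last_phonemes := by
  intro xs _
  simp only [Spec_last_phonemes, last_phonemes, last_phonemes_alt]
  rw [fold_eq_pvLB, lpA_loop_eq]
  by_cases h : pvLB xs xs.length < 0
  · simp [h]
  · rw [if_neg h, if_neg h, PySem.List.slice_from xs (by omega)]
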